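-- pv_equiv track=rewrite | github.com/FadiSaif-BA/Transliteration-Model | src/models/seq2seq_model.py | _rebuild_from_skeleton
-- ===== SOURCE A (Python) =====
-- def _rebuild_from_skeleton(consonants: list) -> str:
--     """
--     Rebuild transliteration from consonant skeleton.
--     Uses simple heuristics for vowel placement.
--     """
--     result = []
--
--     for i, cons in enumerate(consonants):
--         if cons == ' ':
--             result.append(' ')
--             continue
--
--         # Add consonant
--         result.append(cons)
--
--         # Add vowel after consonant (simple heuristic)
--         if i < len(consonants) - 1 and consonants[i + 1] != ' ':
--             # Default to 'a' between consonants
--             result.append('a')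
--
--     output = ''.join(result)
--
--     # Clean up
--     output = output.replace('Ala', 'Al-')  # Fix definite article
--     output = output.rstrip('a')  # Remove trailing 'a'
--
--     return output
-- ===== SOURCE B (Python) =====
-- def _rebuild_from_skeleton(consonants: list) -> str:
--     """Rebuild transliteration by splitting the list into space elements and
--     maximal non-space runs; each run is joined with the default vowel 'a'."""
--     parts = []
--     i = 0
--     n = len(consonants)
--     while i < n:
--         if consonants[i] == ' ':
--             parts.append(' ')
--             i += 1
--         else:
--             j = i
--             while j < n and consonants[j] != ' ':
--                 j += 1
--             parts.append('a'.join(consonants[i:j]))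
--             i = j
--     output = ''.join(parts)
--     output = output.replace('Ala', 'Al-')
--     return output.rstrip('a')
-- ===== Notes on version B (the rewrite author's own statement) =====
-- stated objective: simpler
-- what changed: Replaces the index/lookahead single pass (enumerate plus consonants[i+1] peek) by a run decomposition: split the list into maximal non-space runs, join each run with the default vowel 'a', pass spaces through, then apply the same replace/rstrip cleanups.
import Mathlib
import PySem

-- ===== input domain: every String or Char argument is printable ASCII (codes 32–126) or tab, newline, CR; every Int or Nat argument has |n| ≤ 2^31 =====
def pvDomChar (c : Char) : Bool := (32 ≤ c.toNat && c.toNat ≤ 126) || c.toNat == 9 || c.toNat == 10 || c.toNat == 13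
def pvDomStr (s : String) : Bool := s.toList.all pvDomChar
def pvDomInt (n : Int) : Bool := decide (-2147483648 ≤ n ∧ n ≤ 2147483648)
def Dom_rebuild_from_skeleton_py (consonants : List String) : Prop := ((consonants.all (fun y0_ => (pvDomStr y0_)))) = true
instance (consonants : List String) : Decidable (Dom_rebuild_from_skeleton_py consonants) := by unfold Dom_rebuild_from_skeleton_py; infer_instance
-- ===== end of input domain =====

-- B rebuilds the string by splitting the input into space/non-space runs and joining each
-- non-space run with 'a' (objective: simpler decomposition; same cleanup steps, same result).


-- ===== PORT A =====
-- shared cleanup helper: hand port of s.rstrip('a') (drop trailing 'a' characters; exact —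
-- PySem.Str has no right-only stripChars); both Pythons end with the same two cleanup lines.
def pvRstripA (s : String) : String :=
  String.ofList ((s.toList.reverse.dropWhile (fun c => c = 'a')).reverse)

def rebuild_from_skeleton_py (consonants : List String) : String :=
  -- 'for i, cons in enumerate(consonants)' building 'result'; consonants[i+1] is read only
  -- under the guard i < len-1, so the total pyGetD with default "" is Python-exact here
  let result : List String :=
    (PySem.List.enumerate consonants).foldl
      (fun result p =>
        if p.2 = " " then result ++ [" "]
        else
          let result := result ++ [p.2]
          if p.1 < (consonants.length : Int) - 1 ∧ PySem.List.pyGetD consonants (p.1 + 1) "" ≠ " "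
          then result ++ ["a"] else result)
      []
  let output := PySem.Str.join "" result
  let output := PySem.Str.replace output "Ala" "Al-"
  pvRstripA output

-- ===== PORT B =====
-- termination of pvParts (cited by name in its decreasing_by)
lemma pvParts_dec (c : String) (rest : List String) (h : ¬ c = " ") :
    (List.dropWhile (fun x => x != " ") (c :: rest)).length < (c :: rest).length := by
  rw [List.dropWhile_cons, if_pos (by simp [h])]
  exact Nat.lt_succ_of_le (List.length_dropWhile_le _ _)

-- the outer while loop walks the suffix consonants[i:]: a leading space is emitted alone;
-- otherwise the inner while scan (== takeWhile/dropWhile split) takes the maximal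
-- non-space run, joined with 'a' -- structural recursion on the remaining suffix
def pvParts : List String → List String
  | [] => []
  | c :: rest =>
    if h : c = " " then " " :: pvParts rest
    else
      PySem.Str.join "a" (List.takeWhile (fun x => x != " ") (c :: rest)) ::
        pvParts (List.dropWhile (fun x => x != " ") (c :: rest))
termination_by l => l.length
decreasing_by
  all_goals first
    | exact Nat.lt_succ_of_le le_rfl
    | exact pvParts_dec c rest h

def rebuild_from_skeleton_py_alt (consonants : List String) : String :=
  let output := PySem.Str.join "" (pvParts consonants)
  let output := PySem.Str.replace output "Ala" "Al-"
  pvRstripA output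

-- ===== PRECONDITION & SPEC =====
def Spec_rebuild_from_skeleton_py (consonants : List String) (out : String) : Prop := out = rebuild_from_skeleton_py_alt consonants
instance (consonants : List String) (out : String) : Decidable (Spec_rebuild_from_skeleton_py consonants out) := by unfold Spec_rebuild_from_skeleton_py; infer_instance

-- ===== CLAIM (what is proved, stated in full; the proofs are below) =====
def Claim_equal_rebuild_from_skeleton_py : Prop := ∀ (consonants : List String), Dom_rebuild_from_skeleton_py consonants → Spec_rebuild_from_skeleton_py consonants (rebuild_from_skeleton_py consonants)

-- ===== LEMMAS AND PROOFS =====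

-- does the next element exist and differ from ' ' (A's lookahead condition)
def pvNextCons : List String → Bool
  | [] => false
  | d :: _ => d != " "

-- A's 'result' list, characterised recursively
def pvA : List String → List String
  | [] => []
  | c :: rest =>
    if c = " " then " " :: pvA rest
    else if pvNextCons rest then c :: "a" :: pvA rest else c :: pvA rest

-- ''.join / 'a'.join on the char level
def pvJ0 (xs : List String) : List Char := PySem.Chars.join [] (xs.map String.toList)
def pvJa (xs : List String) : List Char := PySem.Chars.join ['a'] (xs.map String.toList)

lemma pvJ0_cons (x : String) (xs : List String) : pvJ0 (x :: xs) = x.toList ++ pvJ0 xs := by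
  cases xs with
  | nil => simp [pvJ0, PySem.Chars.join_singleton, PySem.Chars.join_nil]
  | cons y ys => simp [pvJ0, PySem.Chars.join_cons_cons]

lemma pvJa_singleton (x : String) : pvJa [x] = x.toList := by
  simp [pvJa, PySem.Chars.join_singleton]

lemma pvJa_cons_cons (x y : String) (xs : List String) :
    pvJa (x :: y :: xs) = x.toList ++ 'a' :: pvJa (y :: xs) := by
  simp [pvJa, PySem.Chars.join_cons_cons]

lemma toList_a : "a".toList = ['a'] := by decide

-- A's foldl over enumerate equals pvA (generalised over the suffix and offset)
lemma foldlA (full : List String) :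
    ∀ (tl : List String) (k : Nat) (acc : List String), List.drop k full = tl →
    (PySem.List.enumerate tl (k : Int)).foldl
      (fun result p =>
        if p.2 = " " then result ++ [" "]
        else
          if p.1 < (full.length : Int) - 1 ∧ PySem.List.pyGetD full (p.1 + 1) "" ≠ " "
            then result ++ [p.2] ++ ["a"] else result ++ [p.2])
      acc = acc ++ pvA tl := by
  intro tl
  induction tl with
  | nil => intro k acc _; simp [PySem.List.enumerate_nil, pvA]
  | cons c rest ih =>
    intro k acc hdrop
    have hk1 : List.drop (k + 1) full = rest := by
      rw [← List.tail_drop, hdrop]; rfl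
    have hlen : full.length = k + 1 + rest.length := by
      have h1 := congrArg List.length hdrop
      simp [List.length_drop] at h1
      have hk : k < full.length := by
        by_contra hge
        rw [List.drop_eq_nil_of_le (by omega)] at hdrop
        exact (List.cons_ne_nil c rest) hdrop.symm
      omega
    have hcast : ((k : Int) + 1) = ((k + 1 : Nat) : Int) := by push_cast; ring
    rw [PySem.List.enumerate_cons, List.foldl_cons]
    by_cases hc : c = " "
    · subst hc
      rw [if_pos rfl, hcast, ih (k + 1) (acc ++ [" "]) hk1]
      simp [pvA]
    · have hget : PySem.List.pyGetD full ((k : Int) + 1) "" = rest.headD "" := by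
        rw [hcast, PySem.List.pyGetD_natCast]
        have h2 : full.getD (k + 1) "" = (full.drop (k + 1)).getD 0 "" := by
          simp [List.getD_eq_getElem?_getD, List.getElem?_drop]
        rw [h2, hk1]
        cases rest <;> simp [List.getD_eq_getElem?_getD]
      simp only [if_neg hc]
      cases rest with
      | nil =>
        have hcond : ¬ ((k : Int) < (full.length : Int) - 1 ∧
            PySem.List.pyGetD full ((k : Int) + 1) "" ≠ " ") := by
          intro h
          have h1 := h.1
          simp [hlen] at h1
        rw [if_neg hcond, hcast, ih (k + 1) (acc ++ [c]) hk1]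
        simp [pvA, pvNextCons, hc]
      | cons d t =>
        have hlt : (k : Int) < (full.length : Int) - 1 := by
          have h3 : full.length = k + 1 + (t.length + 1) := by simpa using hlen
          rw [h3]; push_cast; omega
        by_cases hd : d = " "
        · have hcond : ¬ ((k : Int) < (full.length : Int) - 1 ∧
              PySem.List.pyGetD full ((k : Int) + 1) "" ≠ " ") := by
            intro h; exact h.2 (by simp [hget, hd])
          rw [if_neg hcond, hcast, ih (k + 1) (acc ++ [c]) hk1]
          simp [pvA, pvNextCons, hc, hd]
        · have hcond : ((k : Int) < (full.length : Int) - 1 ∧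
              PySem.List.pyGetD full ((k : Int) + 1) "" ≠ " ") :=
            ⟨hlt, by simp [hget]; exact hd⟩
          rw [if_pos hcond, hcast, ih (k + 1) (acc ++ [c] ++ ["a"]) hk1]
          simp [pvA, pvNextCons, hc, hd]

-- a maximal non-space run contributes 'a'.join(run) to A's output
lemma pvA_run : ∀ (run rest' : List String), run ≠ [] → (∀ x ∈ run, x ≠ " ") →
    (rest' = [] ∨ ∃ t, rest' = " " :: t) →
    pvJ0 (pvA (run ++ rest')) = pvJa run ++ pvJ0 (pvA rest') := by
  intro run
  induction run with
  | nil => intro _ h; exact absurd rfl h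
  | cons x xs ih =>
    intro rest' _ hall hrest
    have hx : x ≠ " " := hall x (by simp)
    cases xs with
    | nil =>
      have hnext : pvNextCons rest' = false := by
        rcases hrest with h | ⟨t, h⟩ <;> simp [h, pvNextCons]
      simp only [List.cons_append, List.nil_append]
      rw [pvJa_singleton]
      cases rest' with
      | nil => simp [pvA, hx, hnext, pvJ0_cons]
      | cons r rt => simp [pvA, hx, hnext, pvJ0_cons]
    | cons y ys =>
      have hy : y ≠ " " := hall y (by simp)
      have hstep : pvA (x :: (y :: (ys ++ rest'))) = x :: "a" :: pvA (y :: (ys ++ rest')) := by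
        simp [pvA, hx, pvNextCons, hy]
      simp only [List.cons_append] at ih ⊢
      rw [hstep, pvJ0_cons, pvJ0_cons, pvJa_cons_cons,
        ih rest' (by simp) (fun z hz => hall z (by simp [hz])) hrest]
      simp [toList_a]

-- A's piece list and B's run list join to the same characters
lemma pvA_parts (cs : List String) : pvJ0 (pvA cs) = pvJ0 (pvParts cs) := by
  have main : ∀ (n : Nat) (cs : List String), cs.length ≤ n →
      pvJ0 (pvA cs) = pvJ0 (pvParts cs) := by
    intro n
    induction n with
    | zero =>
      intro cs hlen
      have h0 : cs = [] := List.length_eq_zero_iff.mp (Nat.le_zero.mp hlen)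
      subst h0
      rw [pvParts.eq_def]; simp [pvA]
    | succ n ih =>
      intro cs hlen
      cases cs with
      | nil => rw [pvParts.eq_def]; simp [pvA]
      | cons c rest =>
        by_cases hc : c = " "
        · have h1 : pvA (c :: rest) = " " :: pvA rest := by simp [pvA, hc]
          have h2 : pvParts (c :: rest) = " " :: pvParts rest := by
            rw [pvParts.eq_def]; simp [hc]
          have hr : rest.length ≤ n := by
            simp [List.length_cons] at hlen; omega
          rw [h1, h2, pvJ0_cons, pvJ0_cons, ih rest hr]
        · set p : String → Bool := fun x => x != " " with hp
          have hpc : p c = true := by simp [hp, hc]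
          have hsplit : List.takeWhile p (c :: rest) ++ List.dropWhile p (c :: rest) = c :: rest :=
            List.takeWhile_append_dropWhile
          have hrun_ne : List.takeWhile p (c :: rest) ≠ [] := by
            simp [hpc]
          have hall : ∀ x ∈ List.takeWhile p (c :: rest), x ≠ " " := by
            intro x hx
            have hmem := List.mem_takeWhile_imp hx
            simpa [hp] using hmem
          have hdropshape : List.dropWhile p (c :: rest) = [] ∨
              ∃ t, List.dropWhile p (c :: rest) = " " :: t := by
            have h := List.head?_dropWhile_not p (c :: rest)
            cases hD : (List.dropWhile p (c :: rest)) with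
            | nil => exact Or.inl rfl
            | cons z zt =>
              right
              refine ⟨zt, ?_⟩
              rw [hD] at h
              simp only [List.head?_cons] at h
              have hz : z = " " := by simpa [hp] using h
              rw [hz]
          have hdlen : (List.dropWhile p (c :: rest)).length ≤ n := by
            have hlen2 := congrArg List.length hsplit
            rw [List.length_append] at hlen2
            have hr : 1 ≤ (List.takeWhile p (c :: rest)).length := by
              cases hT : List.takeWhile p (c :: rest) with
              | nil => exact absurd hT hrun_ne
              | cons _ _ => simp
            simp only [List.length_cons] at hlen2 hlen
            omega
          have h2 : pvParts (c :: rest) =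
              PySem.Str.join "a" (List.takeWhile p (c :: rest)) ::
                pvParts (List.dropWhile p (c :: rest)) := by
            rw [pvParts.eq_def]; simp [hc, hp]
          calc pvJ0 (pvA (c :: rest))
              = pvJ0 (pvA (List.takeWhile p (c :: rest) ++ List.dropWhile p (c :: rest))) := by
                rw [hsplit]
            _ = pvJa (List.takeWhile p (c :: rest)) ++ pvJ0 (pvA (List.dropWhile p (c :: rest))) :=
                pvA_run _ _ hrun_ne hall hdropshape
            _ = pvJa (List.takeWhile p (c :: rest)) ++ pvJ0 (pvParts (List.dropWhile p (c :: rest))) := by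
                rw [ih _ hdlen]
            _ = pvJ0 (pvParts (c :: rest)) := by
                rw [h2, pvJ0_cons, PySem.Str.toList_join, toList_a]
                rfl
  exact main cs.length cs le_rfl

lemma join_eq (cs : List String) :
    PySem.Str.join "" (pvA cs) = PySem.Str.join "" (pvParts cs) := by
  apply String.toList_inj.mp
  rw [PySem.Str.toList_join, PySem.Str.toList_join]
  have hnil : "".toList = ([] : List Char) := by decide
  rw [hnil]
  exact pvA_parts cs

-- ===== VERDICT (by name: the statement is the Claim_ definition above) =====
theorem rebuild_from_skeleton_py_spec : Claim_equal_rebuild_from_skeleton_py := by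
  intro cs _
  unfold Spec_rebuild_from_skeleton_py
  simp only [rebuild_from_skeleton_py, rebuild_from_skeleton_py_alt]
  have hfold := foldlA cs cs 0 [] (by simp)
  simp only [Nat.cast_zero] at hfold
  rw [hfold]
  simp only [List.nil_append]
  rw [join_eq]
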